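-- pv_equiv track=rewrite | github.com/JustPowerful/Revision-Bac-info | Prototype 2022/Jeu1.py | Chance
-- ===== SOURCE A (Python) =====
-- def premier(n):
--     x = 0
--     for i in range(1, n+1):
--         if n % i == 0:
--             x = x+1
--     if (x == 2):
--         return True
--     else:
--         return False
--
-- def Chance(ch):
--     if not(ch.isnumeric() and (len(ch) == 8) and (ch[0] in ["2", "4", "5", "9"])):
--         msg = "Vérifier le numéro de telephone!"
--     else:
--         msg = "Désolé, vous n'avez pas gagné."
--         s = 0
--         for i in range(len(ch)):
--             s = s + int(ch[i]) * i
--         if (premier(s)):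
--             msg = "Félicitaion, vous avez gagné."
--     return msg
-- ===== SOURCE B (Python) =====
-- def premier(n):
--     if n < 2:
--         return False
--     if n == 2:
--         return True
--     if n % 2 == 0:
--         return False
--     i = 3
--     while i * i <= n:
--         if n % i == 0:
--             return False
--         i += 2
--     return True
--
-- def Chance(ch):
--     if ch.isnumeric() and len(ch) == 8 and ch[0] in ["2", "4", "5", "9"]:
--         s = sum(int(c) * i for i, c in enumerate(ch))
--         if premier(s):
--             return "Félicitaion, vous avez gagné."
--         return "Désolé, vous n'avez pas gagné."
--     return "Vérifier le numéro de telephone!"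
-- ===== Notes on version B (the rewrite author's own statement) =====
-- stated objective: idiomatic
-- what changed: premier is rewritten from counting all divisors in range(1, n+1) to short-circuiting odd trial division up to sqrt(n), and the weighted digit sum is built with sum over enumerate instead of an index loop.
import Mathlib
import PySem

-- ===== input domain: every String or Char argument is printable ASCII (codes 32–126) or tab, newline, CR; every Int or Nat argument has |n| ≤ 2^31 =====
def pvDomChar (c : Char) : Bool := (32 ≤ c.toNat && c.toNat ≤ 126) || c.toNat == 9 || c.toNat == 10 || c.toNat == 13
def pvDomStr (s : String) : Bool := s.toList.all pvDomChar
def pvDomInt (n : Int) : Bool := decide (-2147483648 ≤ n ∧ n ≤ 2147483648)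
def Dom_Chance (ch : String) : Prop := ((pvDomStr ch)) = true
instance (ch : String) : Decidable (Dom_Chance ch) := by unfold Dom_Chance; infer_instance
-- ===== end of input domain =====

-- B replaces premier's full divisor count (range(1, n+1)) by short-circuiting odd trial
-- division up to √n, and builds the weighted digit sum with sum over enumerate (idiomatic).

-- ===== PORT A =====
-- premier: count the divisors of n in 1..n, prime iff exactly 2
def premier (n : Int) : Bool :=
  let x : Int := (PySem.List.pyRange 1 (n+1) 1).foldl
    (fun x i => if PySem.Int.mod n i == 0 then x + 1 else x) 0
  if x == 2 then true else false

-- ch.isnumeric() is ported as PySem.Str.strIsdigit: exact on the ASCII domain Dom_Chance,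
-- where isnumeric and isdigit coincide. int(ch[i]) is ported with .getD 0 defaults that are
-- never reached: ch[0..7] exist (len == 8 guard) and are digits (isnumeric guard).
def Chance (ch : String) : String :=
  if !(PySem.Str.strIsdigit ch && (PySem.Str.len ch == 8) &&
       ((PySem.Str.pyGet? ch 0).elim false
          (fun c => ["2", "4", "5", "9"].contains (String.ofList [c])))) then
    "Vérifier le numéro de telephone!"
  else
    let s : Int := (PySem.List.pyRange 0 (PySem.Str.len ch) 1).foldl
      (fun s i => s + ((PySem.Str.pyGet? ch i).elim 0
                         (fun c => (PySem.Int.ofChars? [c]).getD 0)) * i) 0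
    if premier s then "Félicitaion, vous avez gagné."
    else "Désolé, vous n'avez pas gagné."

-- ===== PORT B =====
-- trial division by odd candidates while i*i <= n; fuel (n.toNat + 1) only makes the
-- recursion structural: the loop runs at most √n times, so the fuel never runs out
def trialOdd (n : Int) : Nat → Int → Bool
  | 0, _ => true
  | fuel+1, i =>
    if i * i ≤ n then
      (if PySem.Int.mod n i == 0 then false else trialOdd n fuel (i+2))
    else true

def premierAlt (n : Int) : Bool :=
  if n < 2 then false
  else if n == 2 then true
  else if PySem.Int.mod n 2 == 0 then false
  else trialOdd n (n.toNat + 1) 3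

def Chance_alt (ch : String) : String :=
  if PySem.Str.strIsdigit ch && (PySem.Str.len ch == 8) &&
     ((PySem.Str.pyGet? ch 0).elim false
        (fun c => ["2", "4", "5", "9"].contains (String.ofList [c]))) then
    let s : Int := ((PySem.List.enumerate ch.toList).map
      (fun p => (PySem.Int.ofChars? [p.2]).getD 0 * p.1)).sum
    if premierAlt s then "Félicitaion, vous avez gagné."
    else "Désolé, vous n'avez pas gagné."
  else "Vérifier le numéro de telephone!"

-- ===== PRECONDITION & SPEC =====
def Spec_Chance (ch : String) (out : String) : Prop := out = Chance_alt ch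
instance (ch : String) (out : String) : Decidable (Spec_Chance ch out) := by unfold Spec_Chance; infer_instance

-- ===== CLAIM (what is proved, stated in full; the proofs are below) =====
def Claim_equal_Chance : Prop := ∀ (ch : String), Dom_Chance ch → Spec_Chance ch (Chance ch)

-- ===== LEMMAS AND PROOFS =====

set_option maxRecDepth 8192 in
theorem digit_enum (c : Char) (h : PySem.Chars.isdigit c = true) :
    c = '0' ∨ c = '1' ∨ c = '2' ∨ c = '3' ∨ c = '4' ∨ c = '5' ∨ c = '6' ∨ c = '7' ∨ c = '8' ∨ c = '9' := by
  simp [PySem.Chars.isdigit, Char.le_def, UInt32.le_iff_toNat_le] at h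
  obtain ⟨h1, h2⟩ := h
  have h1' : 48 ≤ c.toNat := h1
  have h2' : c.toNat ≤ 57 := h2
  have hofn := Char.ofNat_toNat c
  interval_cases h : c.toNat <;> rw [← hofn] <;> simp

theorem digit_val (c : Char) (h : PySem.Chars.isdigit c = true) :
    0 ≤ (PySem.Int.ofChars? [c]).getD 0 ∧ (PySem.Int.ofChars? [c]).getD 0 ≤ 9 := by
  rcases digit_enum c h with h | h | h | h | h | h | h | h | h | h <;> subst h <;> decide

set_option maxHeartbeats 2000000 in
set_option maxRecDepth 8192 in
theorem premier_eq_below : ∀ s : Nat, s < 253 → premier (s : Int) = premierAlt (s : Int) := by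
  decide

theorem premier_eq_of_bounds (s : Int) (h0 : 0 ≤ s) (h1 : s ≤ 252) :
    premier s = premierAlt s := by
  have hs : s = ((s.toNat : Nat) : Int) := by omega
  rw [hs]
  exact premier_eq_below s.toNat (by omega)

-- ===== VERDICT (by name: the statement is the Claim_ definition above) =====
theorem Chance_spec : Claim_equal_Chance := by
  intro ch _
  unfold Spec_Chance Chance Chance_alt
  by_cases hc : (PySem.Str.strIsdigit ch && (PySem.Str.len ch == 8) &&
     ((PySem.Str.pyGet? ch 0).elim false
        (fun c => ["2", "4", "5", "9"].contains (String.ofList [c])))) = true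
  · rw [hc]
    simp only [Bool.not_true, Bool.false_eq_true, reduceIte]
    simp only [Bool.and_eq_true, beq_iff_eq] at hc
    obtain ⟨⟨hd, hlen⟩, _⟩ := hc
    have hlen' : ch.toList.length = 8 := by
      have h2 : ch.length = 8 := by exact_mod_cast (by simpa [PySem.Str.len_eq, PySem.Chars.len_eq] using hlen : (ch.length : Int) = 8)
      simpa [String.length_toList] using h2
    rcases hl : ch.toList with _|⟨c0,_|⟨c1,_|⟨c2,_|⟨c3,_|⟨c4,_|⟨c5,_|⟨c6,_|⟨c7,tail⟩⟩⟩⟩⟩⟩⟩⟩ <;>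
      rw [hl] at hlen' <;> simp at hlen'
    subst hlen'
    simp [PySem.Str.strIsdigit_eq, PySem.Chars.strIsdigit, hl] at hd
    obtain ⟨h0, h1, h2, h3, h4, h5, h6, h7⟩ := hd
    have b0 := digit_val c0 h0
    have b1 := digit_val c1 h1
    have b2 := digit_val c2 h2
    have b3 := digit_val c3 h3
    have b4 := digit_val c4 h4
    have b5 := digit_val c5 h5
    have b6 := digit_val c6 h6
    have b7 := digit_val c7 h7
    rw [hlen]
    have hr : PySem.List.pyRange 0 (8:Int) 1 = [0,1,2,3,4,5,6,7] := by decide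
    rw [hr]
    simp [hl, PySem.List.pyGet?, PySem.List.pyIdx?, PySem.List.enumerate]
    generalize (PySem.Int.ofChars? [c1]).getD 0 = d1 at b1 ⊢
    generalize (PySem.Int.ofChars? [c2]).getD 0 = d2 at b2 ⊢
    generalize (PySem.Int.ofChars? [c3]).getD 0 = d3 at b3 ⊢
    generalize (PySem.Int.ofChars? [c4]).getD 0 = d4 at b4 ⊢
    generalize (PySem.Int.ofChars? [c5]).getD 0 = d5 at b5 ⊢
    generalize (PySem.Int.ofChars? [c6]).getD 0 = d6 at b6 ⊢
    generalize (PySem.Int.ofChars? [c7]).getD 0 = d7 at b7 ⊢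
    have hs : d1 + d2 * 2 + d3 * 3 + d4 * 4 + d5 * 5 + d6 * 6 + d7 * 7 =
        d1 + (d2 * 2 + (d3 * 3 + (d4 * 4 + (d5 * 5 + (d6 * 6 + d7 * 7))))) := by ring
    rw [hs, premier_eq_of_bounds _ (by omega) (by omega)]
  · rw [Bool.not_eq_true] at hc
    rw [hc]
    simp
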